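-- pv_equiv track=rewrite | github.com/JuanDiegoAvila/Laboratorio0_Compiladores | tree.py | stringTreeToList
-- ===== SOURCE A (Python) =====
-- def stringTreeToList(tree_string):
--     new_word = ''
--     words = []
--     string_flag = False
--
--     for i in tree_string:
--         if string_flag==False:
--             if i =='(':
--                 words.append(i)
--                 new_word = ''
--             elif i == ' ':
--                 if new_word != '' and new_word!=' ':
--                     words.append(new_word)
--                 new_word=''
--             elif i == ')':
--                 if new_word != '' and new_word!=' ':
--                     words.append(new_word)
--                 new_word=''
--                 words.append(i)
--             elif i == '"':
--                 string_flag=True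
--                 new_word=i
--             else:
--                 new_word+=i
--         else:
--             if i == '"':
--                 string_flag=False
--                 new_word+=i
--                 words.append(new_word)
--                 new_word=''
--             else:
--                 new_word+=i
--     return words
-- ===== SOURCE B (Python) =====
-- def stringTreeToList(tree_string):
--     words = []
--     word = []          # pending word, as a list of chars
--     i = 0
--     n = len(tree_string)
--     while i < n:
--         c = tree_string[i]
--         if c == '(':
--             words.append('(')
--             word = []
--         elif c == ')':
--             if word:
--                 words.append(''.join(word))
--             word = []
--             words.append(')')
--         elif c == ' ':
--             if word:
--                 words.append(''.join(word))
--             word = []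
--         elif c == '"':
--             # lookahead: grab the whole quoted token at once
--             j = tree_string.find('"', i + 1)
--             if j == -1:
--                 return words  # unterminated quote: rest is consumed, nothing emitted
--             words.append(tree_string[i:j + 1])
--             word = []
--             i = j
--         else:
--             word.append(c)
--         i += 1
--     return words
-- ===== Notes on version B (the rewrite author's own statement) =====
-- stated objective: alternative
-- what changed: B replaces A's char-by-char state machine with a string_flag boolean by an index-based scan that, on an opening quote, looks ahead with str.find for the closing quote and emits the whole quoted slice at once (returning early on an unterminated quote), so no in-string mode is ever maintained.
import Mathlib
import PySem

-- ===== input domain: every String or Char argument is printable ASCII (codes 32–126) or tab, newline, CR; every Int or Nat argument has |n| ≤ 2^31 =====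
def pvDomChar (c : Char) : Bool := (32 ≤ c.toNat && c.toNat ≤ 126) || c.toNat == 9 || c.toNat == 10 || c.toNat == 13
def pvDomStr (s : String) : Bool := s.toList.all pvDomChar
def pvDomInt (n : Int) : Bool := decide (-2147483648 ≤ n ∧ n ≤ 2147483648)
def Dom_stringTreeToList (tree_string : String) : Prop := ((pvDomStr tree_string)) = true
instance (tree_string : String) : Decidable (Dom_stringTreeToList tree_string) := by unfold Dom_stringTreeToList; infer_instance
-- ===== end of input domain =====

-- B replaces A's boolean-flag state machine by a scan that handles a quoted token in
-- one lookahead step (find the closing quote, emit the whole slice); same cost (alternative).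

-- ===== PORT A =====
-- state = (new_word as List Char, words, string_flag); one step of A's for-loop body
def stepA : (List Char × List String × Bool) → Char → (List Char × List String × Bool)
  | (w, words, flag), c =>
    if flag = false then
      if c = '(' then ([], words ++ ["("], false)
      else if c = ' ' then
        ([], if w ≠ [] ∧ w ≠ [' '] then words ++ [String.mk w] else words, false)
      else if c = ')' then
        ([], (if w ≠ [] ∧ w ≠ [' '] then words ++ [String.mk w] else words) ++ [")"], false)
      else if c = '"' then (['"'], words, true)
      else (w ++ [c], words, false)
    else
      if c = '"' then ([], words ++ [String.mk (w ++ ['"'])], false)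
      else (w ++ [c], words, true)

def stringTreeToList (tree_string : String) : List String :=
  (tree_string.toList.foldl stepA ([], [], false)).2.1

-- ===== PORT B =====
-- Source B's `tree_string.find('"', i + 1)` + slice, on the remaining characters:
-- none = no closing quote; some (inner, rest') = chars strictly between the quotes / chars after the closing quote
def findQ : List Char → Option (List Char × List Char)
  | [] => none
  | c :: rest => if c = '"' then some ([], rest)
                 else (findQ rest).map (fun p => (c :: p.1, p.2))

-- termination helper for altGo (the scan resumes after the closing quote, strictly further on)
theorem findQ_length : ∀ (l inner rest : List Char),
    findQ l = some (inner, rest) → rest.length < l.length := by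
  intro l
  induction l with
  | nil => intro inner rest h; simp [findQ] at h
  | cons c tl ih =>
    intro inner rest h
    by_cases hc : c = '"'
    · simp [findQ, hc] at h
      simp [← h.2]
    · simp only [findQ, if_neg hc] at h
      cases hq : findQ tl with
      | none => rw [hq] at h; simp at h
      | some p =>
        rw [hq] at h
        cases p with
        | mk a b =>
          simp at h
          have := ih a b hq
          simp [← h.2]; omega

-- Source B's while loop: `rest` is the unread suffix, `word` the pending word, `words` the output
def altGo : List Char → List Char → List String → List String
  | [], _, words => words
  | c :: rest, word, words =>
    if c = '(' then altGo rest [] (words ++ ["("])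
    else if c = ')' then
      altGo rest [] ((if word = [] then words else words ++ [String.mk word]) ++ [")"])
    else if c = ' ' then
      altGo rest [] (if word = [] then words else words ++ [String.mk word])
    else if c = '"' then
      match h : findQ rest with
      | none => words
      | some (inner, rest') =>
        altGo rest' [] (words ++ [String.mk ('"' :: (inner ++ ['"']))])
    else altGo rest (word ++ [c]) words
termination_by rest _ _ => rest.length
decreasing_by
  all_goals simp
  exact le_of_lt (findQ_length rest inner rest' h)

def stringTreeToList_alt (tree_string : String) : List String :=
  altGo tree_string.toList [] []

-- ===== PRECONDITION & SPEC =====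
def Spec_stringTreeToList (tree_string : String) (out : List String) : Prop := out = stringTreeToList_alt tree_string
instance (tree_string : String) (out : List String) : Decidable (Spec_stringTreeToList tree_string out) := by unfold Spec_stringTreeToList; infer_instance

-- ===== CLAIM (what is proved, stated in full; the proofs are below) =====
def Claim_equal_stringTreeToList : Prop := ∀ (tree_string : String), Dom_stringTreeToList tree_string → Spec_stringTreeToList tree_string (stringTreeToList tree_string)

-- ===== LEMMAS AND PROOFS =====
-- A in string mode consumes up to the closing quote (if any) exactly as findQ describes
theorem stringMode (rest : List Char) : ∀ (w : List Char) (words : List String),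
    List.foldl stepA (w, words, true) rest =
      match findQ rest with
      | none => (w ++ rest, words, true)
      | some (inner, rest') =>
          List.foldl stepA ([], words ++ [String.mk (w ++ inner ++ ['"'])], false) rest' := by
  induction rest with
  | nil => intro w words; simp [findQ]
  | cons c tl ih =>
    intro w words
    by_cases hc : c = '"'
    · simp [List.foldl, stepA, hc, findQ]
    · simp only [List.foldl, stepA, findQ, if_neg hc, reduceCtorEq, reduceIte]
      rw [ih]
      cases hq : findQ tl with
      | none => simp
      | some p =>
        cases p with
        | mk inner rest' => simp

-- the two loops agree from any normal-mode state whose pending word contains no space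
theorem mainGo : ∀ (n : Nat) (rest : List Char), rest.length ≤ n →
    ∀ (w : List Char) (words : List String), ' ' ∉ w →
      (List.foldl stepA (w, words, false) rest).2.1 = altGo rest w words := by
  intro n
  induction n with
  | zero =>
    intro rest hn w words _
    have h0 : rest = [] := List.eq_nil_of_length_eq_zero (Nat.le_zero.mp hn)
    subst h0; rw [altGo.eq_def]; simp
  | succ n ih =>
    intro rest hn w words hw
    cases rest with
    | nil => rw [altGo.eq_def]; simp
    | cons c tl =>
      have htl : tl.length ≤ n := by simpa using hn
      have hflush : (if w ≠ [] ∧ w ≠ [' '] then words ++ [String.mk w] else words)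
          = (if w = [] then words else words ++ [String.mk w]) := by
        by_cases h0 : w = []
        · simp [h0]
        · have hne : w ≠ [' '] := by intro h; rw [h] at hw; simp at hw
          simp [h0, hne]
      rw [altGo.eq_def]
      by_cases h1 : c = '('
      · simp only [List.foldl, stepA]
        simp only [h1, reduceIte]
        exact ih tl htl [] _ (by simp)
      · by_cases h2 : c = ')'
        · simp only [List.foldl, stepA]
          simp [h2, hflush]
          exact ih tl htl [] _ (by simp)
        · by_cases h3 : c = ' '
          · simp only [List.foldl, stepA]
            simp [h3, hflush]
            exact ih tl htl [] _ (by simp)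
          · by_cases h4 : c = '"'
            · simp only [List.foldl, stepA]
              simp [h4]
              rw [stringMode]
              cases hq : findQ tl with
              | none => simp
              | some p =>
                cases p with
                | mk inner rest' =>
                  simp only [Option.some.injEq]
                  have hr : rest'.length ≤ n :=
                    le_trans (le_of_lt (findQ_length tl inner rest' hq)) htl
                  rw [ih rest' hr [] _ (by simp)]
                  simp
            · simp only [List.foldl, stepA, if_neg h1, if_neg h2, if_neg h3, if_neg h4, reduceIte]
              exact ih tl htl (w ++ [c]) words (by simp [hw, Ne.symm h3])

-- ===== VERDICT (by name: the statement is the Claim_ definition above) =====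
theorem stringTreeToList_spec : Claim_equal_stringTreeToList := by
  intro s _
  unfold Spec_stringTreeToList stringTreeToList stringTreeToList_alt
  exact mainGo s.toList.length s.toList le_rfl [] [] (by simp)
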